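-- pv_equiv track=rewrite | github.com/ChloeCro/Summarization | general_utils/sectioned_labels.py | organize_by_number
-- ===== SOURCE A (Python) =====
-- from collections import defaultdict
--
-- def organize_by_number(strings):
--     result = defaultdict(list)
--     for string in strings:
--         period_index = string.find('.')
--         if period_index != -1:
--             number = string[:period_index]
--             if number.isdigit():
--                 result[int(number)].append(string)
--
--     # Join the lists into a single string per key
--     for key in result:
--         result[key] = ' '.join(result[key])
--
--     # Sort the dictionary by keys to ensure order
--     sorted_result = dict(sorted(result.items()))
--     return sorted_result
-- ===== SOURCE B (Python) =====
-- def organize_by_number(strings):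
--     keyed = []
--     for s in strings:
--         i = s.find('.')
--         if i != -1 and s[:i].isdigit():
--             keyed.append((int(s[:i]), s))
--     return {k: ' '.join(s for kk, s in keyed if kk == k)
--             for k in sorted({k for k, _ in keyed})}
-- ===== Notes on version B (the rewrite author's own statement) =====
-- stated objective: alternative
-- what changed: Replaces A's defaultdict-of-lists grouping plus in-place join plus sort-of-items with a single extraction pass into (key, string) pairs, a sorted set of the distinct keys, and one join-of-matching-strings comprehension per key.
import Mathlib
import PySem

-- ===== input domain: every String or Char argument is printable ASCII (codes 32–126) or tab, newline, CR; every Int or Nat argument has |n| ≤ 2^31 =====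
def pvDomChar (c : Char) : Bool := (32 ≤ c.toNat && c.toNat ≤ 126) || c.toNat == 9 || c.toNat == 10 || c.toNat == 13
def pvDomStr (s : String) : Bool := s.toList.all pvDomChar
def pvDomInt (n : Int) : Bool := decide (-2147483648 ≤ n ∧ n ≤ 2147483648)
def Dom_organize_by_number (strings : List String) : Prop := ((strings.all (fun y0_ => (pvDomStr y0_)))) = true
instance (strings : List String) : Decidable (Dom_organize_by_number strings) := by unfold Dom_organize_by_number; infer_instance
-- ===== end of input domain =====

-- B replaces A's defaultdict grouping + in-place join + sort of items by one extraction pass,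
-- a sorted set of distinct keys, and a per-key join of matching strings (alternative decomposition, similar cost).


-- ===== PORT A =====
-- int(number) is ported as (ofStr? number).getD 0: in the branch number.isdigit() holds, so on the
-- ASCII domain int(number) never raises and ofStr? is some there.
def organize_by_number (strings : List String) : List (Int × String) :=
  let result := strings.foldl (fun d s =>
      let period_index := PySem.Str.find s "."
      if period_index != -1 then
        let number := PySem.Str.slice s none (some period_index)
        if PySem.Str.strIsdigit number then
          d.modify ((PySem.Int.ofStr? number).getD 0) [] (fun l => l ++ [s])
        else d
      else d) PySem.Dict.empty
  let joined := PySem.Dict.mk (result.items.map (fun p => (p.1, PySem.Str.join " " p.2)))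
  PySem.List.sorted2 joined.items (fun p => p.1) (fun p => p.2)

-- ===== PORT B =====
def organize_by_number_alt (strings : List String) : List (Int × String) :=
  let keyed := strings.foldl (fun acc s =>
      let i := PySem.Str.find s "."
      if i != -1 && PySem.Str.strIsdigit (PySem.Str.slice s none (some i)) then
        acc ++ [((PySem.Int.ofStr? (PySem.Str.slice s none (some i))).getD 0, s)]
      else acc) []
  (PySem.List.sorted (PySem.Set.ofList (keyed.map (·.1))) (fun k => k)).map
    (fun k => (k, PySem.Str.join " " ((keyed.filter (fun p => p.1 == k)).map (·.2))))

-- ===== PRECONDITION & SPEC =====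
-- Pre_ excludes strings whose digit-like prefix before the first "." contains a non-ASCII
-- digit character: there Python's int() raises ValueError.
def Pre_organize_by_number (strings : List String) : Prop :=
  -- every ASCII input, e.g. ["2."], satisfies this (inside the ASCII domain it excludes nothing)
  (strings.all (fun s =>
    !(PySem.Str.find s "." != -1 &&
      PySem.Str.strIsdigit (PySem.Str.slice s none (some (PySem.Str.find s ".")))) ||
    (s.toList.takeWhile (fun c => c != '.')).all (fun c => c.isDigit))) = true
instance (strings : List String) : Decidable (Pre_organize_by_number strings) := by unfold Pre_organize_by_number; infer_instance
def pvWitness_organize_by_number : List String := (["1.a", "2.b", "1.c"])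

def Spec_organize_by_number (strings : List String) (out : List (Int × String)) : Prop := out = organize_by_number_alt strings
instance (strings : List String) (out : List (Int × String)) : Decidable (Spec_organize_by_number strings out) := by unfold Spec_organize_by_number; infer_instance

-- ===== CLAIM (what is proved, stated in full; the proofs are below) =====
def Claim_equal_organize_by_number : Prop := ∀ (strings : List String), Dom_organize_by_number strings → Pre_organize_by_number strings → Spec_organize_by_number strings (organize_by_number strings)

-- ===== LEMMAS AND PROOFS =====

-- the shared string test and key extraction
def pvKeyOk (s : String) : Bool :=
  PySem.Str.find s "." != -1 &&
    PySem.Str.strIsdigit (PySem.Str.slice s none (some (PySem.Str.find s ".")))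

def pvKeyOf (s : String) : Int :=
  (PySem.Int.ofStr? (PySem.Str.slice s none (some (PySem.Str.find s ".")))).getD 0

-- insertBy only looks at comparisons of x against members of ys
theorem pv_insertBy_congr {α : Type} (before before' : α → α → Bool) (x : α) (ys : List α)
    (h : ∀ y ∈ ys, before x y = before' x y) :
    PySem.List.insertBy before x ys = PySem.List.insertBy before' x ys := by
  induction ys with
  | nil => rfl
  | cons y ys ih =>
      have hy := h y (by simp)
      simp only [PySem.List.insertBy, hy]
      by_cases hb : before' x y = true
      · simp [hb]
      · simp only [hb]
        simp [ih (fun z hz => h z (by simp [hz]))]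

-- a tuple-key sort whose elements have pairwise distinct first keys is the sort by the first key
theorem pv_sorted2_eq_sorted_fst (xs : List (Int × String))
    (h : xs.Pairwise (fun a b => a.1 ≠ b.1)) :
    PySem.List.sorted2 xs (fun p => p.1) (fun p => p.2) =
      PySem.List.sorted xs (fun p => p.1) := by
  simp only [PySem.List.sorted2, PySem.List.sorted, if_neg (by decide : ¬ (false = true))]
  -- generalize the accumulator with the invariant that its members have first keys distinct from xs's
  suffices H : ∀ (l acc : List (Int × String)), l.Pairwise (fun a b => a.1 ≠ b.1) →
      (∀ a ∈ acc, ∀ b ∈ l, a.1 ≠ b.1) →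
      l.foldl (fun acc x => PySem.List.insertBy
          (fun a b => decide (a.1 < b.1) || (!decide (b.1 < a.1) && decide (a.2 < b.2))) x acc) acc
        = l.foldl (fun acc x => PySem.List.insertBy (fun a b => decide (a.1 < b.1)) x acc) acc by
    exact H xs [] h (by simp)
  intro l
  induction l with
  | nil => intro acc _ _; rfl
  | cons x t ih =>
      intro acc hp hacc
      have hins : PySem.List.insertBy
          (fun a b => decide (a.1 < b.1) || (!decide (b.1 < a.1) && decide (a.2 < b.2))) x acc
          = PySem.List.insertBy (fun a b => decide (a.1 < b.1)) x acc := by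
        refine pv_insertBy_congr _ _ x acc (fun y hy => ?_)
        have hne : y.1 ≠ x.1 := hacc y hy x (by simp)
        by_cases hlt : x.1 < y.1
        · simp [hlt]
        · have : y.1 < x.1 := lt_of_le_of_ne (not_lt.mp hlt) hne
          simp [hlt, this]
      simp only [List.foldl_cons, hins]
      refine ih (PySem.List.insertBy (fun a b => decide (a.1 < b.1)) x acc) hp.of_cons ?_
      intro a ha b hb
      rcases (PySem.List.insertBy_mem_iff _ x a acc).mp ha with rfl | ha'
      · exact (List.pairwise_cons.mp hp).1 b hb
      · exact hacc a ha' b (List.mem_cons_of_mem _ hb)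

-- A's per-string step in terms of pvKeyOk / pvKeyOf
theorem pv_A_step (d : PySem.Dict Int (List String)) (s : String) :
    (if PySem.Str.find s "." != -1 then
       if PySem.Str.strIsdigit (PySem.Str.slice s none (some (PySem.Str.find s "."))) then
         d.modify ((PySem.Int.ofStr? (PySem.Str.slice s none (some (PySem.Str.find s ".")))).getD 0)
           [] (fun l => l ++ [s])
       else d
     else d)
    = if pvKeyOk s then d.modify (pvKeyOf s) [] (fun l => l ++ [s]) else d := by
  unfold pvKeyOk pvKeyOf
  by_cases h1 : (PySem.Str.find s "." != -1) = true
  · by_cases h2 : PySem.Str.strIsdigit (PySem.Str.slice s none (some (PySem.Str.find s "."))) = true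
    · simp only [h1, h2, Bool.true_and, if_true]
    · simp only [h1, h2, Bool.true_and, if_true, Bool.false_eq_true, if_false]
  · simp only [h1, Bool.false_and, Bool.false_eq_true, if_false]

-- B's extraction loop builds the keyed pair list
theorem pv_B_keyed (strings : List String) :
    strings.foldl (fun acc s =>
      if PySem.Str.find s "." != -1 &&
          PySem.Str.strIsdigit (PySem.Str.slice s none (some (PySem.Str.find s "."))) then
        acc ++ [((PySem.Int.ofStr? (PySem.Str.slice s none (some (PySem.Str.find s ".")))).getD 0, s)]
      else acc) []
    = (strings.filter pvKeyOk).map (fun s => (pvKeyOf s, s)) := by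
  have := PySem.List.foldl_append_if pvKeyOk (fun s => (pvKeyOf s, s)) strings []
  simpa [pvKeyOk, pvKeyOf] using this

theorem pv_main (strings : List String) :
    organize_by_number strings = organize_by_number_alt strings := by
  unfold organize_by_number organize_by_number_alt
  dsimp only
  rw [pv_B_keyed]
  set l := strings.filter pvKeyOk with hl
  set keyed := l.map (fun s => (pvKeyOf s, s)) with hkeyed
  -- A's dict fold in filtered form
  have hfold : strings.foldl (fun d s =>
      if PySem.Str.find s "." != -1 then
        if PySem.Str.strIsdigit (PySem.Str.slice s none (some (PySem.Str.find s "."))) then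
          d.modify ((PySem.Int.ofStr? (PySem.Str.slice s none (some (PySem.Str.find s ".")))).getD 0)
            [] (fun l => l ++ [s])
        else d
      else d) PySem.Dict.empty
      = keyed.foldl (fun d p => d.modify p.1 [] (fun v => v ++ [p.2])) PySem.Dict.empty := by
    have h1 := PySem.List.foldl_congr_mem
      (l := strings)
      (f := fun d s =>
        if PySem.Str.find s "." != -1 then
          if PySem.Str.strIsdigit (PySem.Str.slice s none (some (PySem.Str.find s "."))) then
            d.modify ((PySem.Int.ofStr? (PySem.Str.slice s none (some (PySem.Str.find s ".")))).getD 0)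
              [] (fun l => l ++ [s])
          else d
        else d)
      (g := fun d s => if pvKeyOk s then d.modify (pvKeyOf s) [] (fun v => v ++ [s]) else d)
      (init := PySem.Dict.empty)
      (fun d s _ => pv_A_step d s)
    rw [h1, PySem.List.foldl_if_eq_foldl_filter, hkeyed, List.foldl_map]
  rw [hfold]
  set d := keyed.foldl (fun d p => d.modify p.1 [] (fun v => v ++ [p.2])) PySem.Dict.empty with hd
  -- keys of d
  have hkeys : d.keys = PySem.Set.ofList (keyed.map (fun p => p.1)) := by
    rw [hd, PySem.Dict.keys_foldl_modify_key keyed (fun p => p.1) [] (fun _ p v => v ++ [p.2])]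
    simp [PySem.Set.update, PySem.Set.ofList, PySem.Dict.empty]
  have hnodup : d.keys.Nodup := by
    rw [hd]
    exact PySem.Dict.nodup_keys_foldl_modify_key keyed (fun p => p.1) [] (fun _ p v => v ++ [p.2]) _
      PySem.Dict.nodup_keys_empty
  -- values of d
  have hget : ∀ k, d.getD k [] = (keyed.filter (fun p => p.1 == k)).map (fun p => p.2) := by
    intro k
    rw [hd, PySem.Dict.getD_foldl_modify_append keyed PySem.Dict.empty k]
    simp
  have hitems : d.items.map (fun p => (p.1, PySem.Str.join " " p.2))
      = (PySem.Set.ofList (keyed.map (fun p => p.1))).map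
          (fun k => (k, PySem.Str.join " " ((keyed.filter (fun p => p.1 == k)).map (fun p => p.2)))) := by
    rw [PySem.Dict.items_eq_map_keys d hnodup [], hkeys, List.map_map]
    exact List.map_congr_left (fun k _ => by simp [hget k])
  rw [hitems]
  set g : Int → Int × String := fun k =>
    (k, PySem.Str.join " " ((keyed.filter (fun p => p.1 == k)).map (fun p => p.2))) with hg
  set S : List Int := PySem.Set.ofList (keyed.map (fun p => p.1)) with hS
  -- distinct first keys, so the tuple sort is the fst sort
  have hne : (S.map g).Pairwise (fun a b => a.1 ≠ b.1) := by
    rw [List.pairwise_map]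
    exact (PySem.Set.nodup_ofList _).imp (by intro a b h; simpa [hg] using h)
  rw [pv_sorted2_eq_sorted_fst _ hne]
  -- name the sorted order
  refine PySem.List.sorted_eq_of_perm_of_pairwise_lt _ _ _ ?_ ?_
  · exact ((PySem.List.sorted_perm S (fun k => k) false).map g)
  · rw [List.pairwise_map]
    have := PySem.List.sorted_ofList_pairwise_lt (keyed.map (fun p => p.1))
    simpa [hg, hS] using this

-- ===== VERDICT (by name: the statement is the Claim_ definition above) =====
theorem organize_by_number_spec : Claim_equal_organize_by_number := by
  intro strings _ _
  unfold Spec_organize_by_number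
  exact pv_main strings
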